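-- pv_equiv track=rewrite | github.com/simplekile/MonoStudio26 | monostudio/core/department_registry.py | _compute_relative_paths
-- ===== SOURCE A (Python) =====
-- def _compute_relative_paths(mapping: dict[str, dict]) -> tuple[dict[str, str], dict[str, str]]:
--     """
--     Compute full relative path per dept_id for shot and asset (nested: parent/child on disk).
--     Returns (shot_rel: dept_id -> path, asset_rel: dept_id -> path).
--     """
--     shot_rel: dict[str, str] = {}
--     asset_rel: dict[str, str] = {}
--
--     def build_paths(context_key: str) -> None:
--         rel = shot_rel if context_key == "shot" else asset_rel
--         key = "shot_folder" if context_key == "shot" else "asset_folder"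
--         ordered: list[str] = []
--         seen: set[str] = set()
--         while len(ordered) < len(mapping):
--             added = False
--             for dept_id, node in mapping.items():
--                 if dept_id in seen:
--                     continue
--                 parent = node.get("parent")
--                 if not parent or parent not in mapping or parent in seen:
--                     ordered.append(dept_id)
--                     seen.add(dept_id)
--                     added = True
--             if not added:
--                 break
--         for dept_id in ordered:
--             node = mapping[dept_id]
--             folder = (node.get(key) or node.get("folder") or dept_id or "").strip()
--             parent = node.get("parent")
--             if not parent or parent not in mapping:
--                 rel[dept_id] = folder
--             else:
--                 parent_path = rel.get(parent) or ""
--                 rel[dept_id] = f"{parent_path}/{folder}" if parent_path else folder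
--
--     build_paths("shot")
--     build_paths("asset")
--     return shot_rel, asset_rel
-- ===== SOURCE B (Python) =====
-- def _compute_relative_paths(mapping: dict[str, dict]) -> tuple[dict[str, str], dict[str, str]]:
--     """
--     Compute full relative path per dept_id for shot and asset (nested: parent/child on disk).
--     Returns (shot_rel: dept_id -> path, asset_rel: dept_id -> path).
--     Each dept's path is resolved by a direct recursive walk up its parent chain
--     (None for cyclic ancestry); depts are emitted in mapping order.
--     """
--
--     def build(key: str) -> dict[str, str]:
--         def path(dept_id: str, seen: set[str]) -> str | None:
--             node = mapping[dept_id]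
--             folder = (node.get(key) or node.get("folder") or dept_id or "").strip()
--             parent = node.get("parent")
--             if not parent or parent not in mapping:
--                 return folder
--             if parent in seen:
--                 return None  # cyclic ancestry: no path
--             pp = path(parent, seen | {parent})
--             if pp is None:
--                 return None
--             return f"{pp}/{folder}" if pp else folder
--
--         rel: dict[str, str] = {}
--         for dept_id in mapping:
--             p = path(dept_id, {dept_id})
--             if p is not None:
--                 rel[dept_id] = p
--         return rel
--
--     return build("shot_folder"), build("asset_folder")
-- ===== Notes on version B (the rewrite author's own statement) =====
-- stated objective: simpler
-- what changed: A repeatedly rescans the whole dict until a fixpoint to build a parent-before-child order and then folds paths over that order; B resolves each dept's path directly by one recursive walk up its parent chain (with a seen-set for cycles) and emits depts in mapping order; Pre_ excludes mappings where a dept precedes its in-mapping parent, where the output dicts' key insertion order is an accident of A's multi-pass relaxation (the key-to-path pairs still agree as dicts).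
import Mathlib
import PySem

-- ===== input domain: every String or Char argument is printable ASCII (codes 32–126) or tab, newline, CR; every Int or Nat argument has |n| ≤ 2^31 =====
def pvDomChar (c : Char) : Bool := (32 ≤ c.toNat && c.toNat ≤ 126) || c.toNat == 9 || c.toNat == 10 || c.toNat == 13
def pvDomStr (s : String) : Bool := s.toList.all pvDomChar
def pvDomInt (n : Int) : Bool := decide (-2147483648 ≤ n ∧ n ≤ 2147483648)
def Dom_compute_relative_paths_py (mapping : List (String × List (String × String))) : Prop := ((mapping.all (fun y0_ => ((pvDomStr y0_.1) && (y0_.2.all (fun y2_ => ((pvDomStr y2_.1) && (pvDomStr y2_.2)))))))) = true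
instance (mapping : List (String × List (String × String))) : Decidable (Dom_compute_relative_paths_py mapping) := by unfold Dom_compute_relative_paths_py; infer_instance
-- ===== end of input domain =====

-- B replaces A's repeated whole-dict relaxation passes by one recursive walk up each
-- dept's parent chain (simpler); on the return values only — neither program mutates
-- its argument.

-- ===== PORT A =====
-- `x or y` on strings ("" is falsy)
def pvOrD (o : Option String) (dflt : String) : String :=
  match o with
  | some s => if s = "" then dflt else s
  | none => dflt

-- `(node.get(key) or node.get("folder") or dept_id or "").strip()`  (note `d or ""` = d)
def pvFolder (key dept : String) (node : List (String × String)) : String :=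
  PySem.Str.strip (pvOrD (PySem.Dict.get? (PySem.Dict.mk node) key)
    (pvOrD (PySem.Dict.get? (PySem.Dict.mk node) "folder") dept))

-- `node.get("parent")`
def pvParent (node : List (String × String)) : Option String :=
  PySem.Dict.get? (PySem.Dict.mk node) "parent"

-- `not parent or parent not in mapping`
def pvNoParent (mapping : List (String × List (String × String))) (node : List (String × String)) : Bool :=
  match pvParent node with
  | none => true
  | some p => p == "" || !(PySem.Dict.contains (PySem.Dict.mk mapping) p)

-- body of A's `for dept_id, node in mapping.items():` inside the while loop
def pvPassStep (mapping : List (String × List (String × String)))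
    (st : List String × PySem.Set String × Bool) (pr : String × List (String × String)) :
    List String × PySem.Set String × Bool :=
  let (ordered, seen, added) := st
  if PySem.Set.contains seen pr.1 then (ordered, seen, added)
  else
    let elig : Bool :=
      match pvParent pr.2 with
      | none => true
      | some p => p == "" || !(PySem.Dict.contains (PySem.Dict.mk mapping) p) || PySem.Set.contains seen p
    if elig then (ordered ++ [pr.1], PySem.Set.add seen pr.1, true) else (ordered, seen, added)

-- A's `while len(ordered) < len(mapping): ...` (fuel mapping.length + 1 is enough: every
-- iteration that recurses appended at least one element, so the fuel never runs out first)
def pvLoopA (mapping : List (String × List (String × String))) :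
    Nat → List String → PySem.Set String → List String
  | 0, ordered, _ => ordered
  | fuel + 1, ordered, seen =>
    if ordered.length < mapping.length then
      let st := mapping.foldl (pvPassStep mapping) (ordered, seen, false)
      if st.2.2 then pvLoopA mapping fuel st.1 st.2.1 else st.1
    else ordered

-- body of A's `for dept_id in ordered:`
def pvRelStep (mapping : List (String × List (String × String))) (key : String)
    (rel : PySem.Dict String String) (dept : String) : PySem.Dict String String :=
  match PySem.Dict.get? (PySem.Dict.mk mapping) dept with
  | none => rel  -- unreachable: every ordered id is a key of mapping
  | some node =>
    let folder := pvFolder key dept node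
    if pvNoParent mapping node then rel.insert dept folder
    else
      let pp := pvOrD (rel.get? ((pvParent node).getD "")) ""
      rel.insert dept (if pp = "" then folder else pp ++ "/" ++ folder)

-- A's `build_paths` (the two context keys only differ in the folder key used)
def pvBuildA (mapping : List (String × List (String × String))) (key : String) :
    List (String × String) :=
  let ordered := pvLoopA mapping (mapping.length + 1) [] PySem.Set.empty
  (ordered.foldl (pvRelStep mapping key) PySem.Dict.empty).items

def compute_relative_paths_py (mapping : List (String × List (String × String))) :
    (List (String × String)) × (List (String × String)) :=
  (pvBuildA mapping "shot_folder", pvBuildA mapping "asset_folder")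

-- ===== PORT B =====
-- B's recursive `path(dept_id, seen)` (fuel mapping.length + 1 is enough: `seen` gains a
-- new key of the mapping at every recursive call)
def pvPathB (mapping : List (String × List (String × String))) (key : String) :
    Nat → String → PySem.Set String → Option String
  | 0, _, _ => none
  | fuel + 1, dept, seen =>
    match PySem.Dict.get? (PySem.Dict.mk mapping) dept with
    | none => none  -- unreachable: dept is always a key of mapping
    | some node =>
      let folder := pvFolder key dept node
      if pvNoParent mapping node then some folder
      else
        let p := (pvParent node).getD ""
        if PySem.Set.contains seen p then none
        else
          match pvPathB mapping key fuel p (PySem.Set.union seen (PySem.Set.add PySem.Set.empty p)) with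
          | none => none
          | some pp => some (if pp = "" then folder else pp ++ "/" ++ folder)

-- B's `build`: `for dept_id in mapping:` inserting the resolvable paths
def pvBuildB (mapping : List (String × List (String × String))) (key : String) :
    List (String × String) :=
  (mapping.foldl (fun rel pr =>
    match pvPathB mapping key (mapping.length + 1) pr.1 (PySem.Set.add PySem.Set.empty pr.1) with
    | none => rel
    | some p => rel.insert pr.1 p) PySem.Dict.empty).items

def compute_relative_paths_py_alt (mapping : List (String × List (String × String))) :
    (List (String × String)) × (List (String × String)) :=
  (pvBuildB mapping "shot_folder", pvBuildB mapping "asset_folder")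

-- ===== PRECONDITION & SPEC =====
-- Pre_ excludes (a) association lists with a duplicated dept id or a duplicated key inside
-- a node (a Python dict has no duplicate keys, so such lists correspond to no dict input)
-- and (b) mappings where a dept precedes its in-mapping parent: there the output dicts'
-- key insertion order is an accident of A's multi-pass relaxation (the key→path pairs
-- still agree as dicts).
def Pre_compute_relative_paths_py (mapping : List (String × List (String × String))) : Prop :=
  (mapping.map Prod.fst).Nodup ∧ (∀ pr ∈ mapping, (pr.2.map Prod.fst).Nodup) ∧
  ∀ i, (hi : i < mapping.length) → ∀ p ∈ (pvParent (mapping[i].2)).toList,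
    p = "" ∨ p ∉ mapping.map Prod.fst ∨ (mapping.map Prod.fst).idxOf p < i
instance (mapping : List (String × List (String × String))) :
    Decidable (Pre_compute_relative_paths_py mapping) := by
  unfold Pre_compute_relative_paths_py; infer_instance

def pvWitness_compute_relative_paths_py : List (String × List (String × String)) :=
  [("art", [("parent", ""), ("folder", " art ")]),
   ("anim", [("parent", "art"), ("shot_folder", "anim")])]

def Spec_compute_relative_paths_py (mapping : List (String × List (String × String)))
    (out : (List (String × String)) × (List (String × String))) : Prop :=
  out = compute_relative_paths_py_alt mapping
instance (mapping : List (String × List (String × String)))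
    (out : (List (String × String)) × (List (String × String))) :
    Decidable (Spec_compute_relative_paths_py mapping out) := by
  unfold Spec_compute_relative_paths_py; infer_instance

-- ===== CLAIM (what is proved, stated in full; the proofs are below) =====
def Claim_equal_compute_relative_paths_py : Prop :=
  ∀ (mapping : List (String × List (String × String))), Dom_compute_relative_paths_py mapping →
    Pre_compute_relative_paths_py mapping →
    Spec_compute_relative_paths_py mapping (compute_relative_paths_py mapping)

-- ===== LEMMAS AND PROOFS =====

-- proof-side: keys of the mapping
def pvKeys (mapping : List (String × List (String × String))) : List String :=
  mapping.map Prod.fst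

-- proof-side spec path: pvPathB without the seen set (fuel-bounded parent descent)
def pvP (mapping : List (String × List (String × String))) (key : String) :
    Nat → String → String
  | 0, _ => ""
  | fuel + 1, dept =>
    match PySem.Dict.get? (PySem.Dict.mk mapping) dept with
    | none => ""
    | some node =>
      if pvNoParent mapping node then pvFolder key dept node
      else
        let pp := pvP mapping key fuel ((pvParent node).getD "")
        if pp = "" then pvFolder key dept node else pp ++ "/" ++ pvFolder key dept node

theorem pvGet?_of_mem {m : List (String × List (String × String))}
    {d : String} {node : List (String × String)} (hnd : (pvKeys m).Nodup)
    (h : (d, node) ∈ m) : PySem.Dict.get? (PySem.Dict.mk m) d = some node := by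
  exact (PySem.Dict.get?_eq_some_iff_mem_items _ _ _ hnd).2 h

theorem pvContains_iff {m : List (String × List (String × String))} {p : String} :
    PySem.Dict.contains (PySem.Dict.mk m) p = true ↔ p ∈ pvKeys m :=
  PySem.Dict.contains_iff_mem_keys _ _

theorem pvNoParent_false {m : List (String × List (String × String))}
    {node : List (String × String)} (h : pvNoParent m node = false) :
    ∃ q, pvParent node = some q ∧ q ≠ "" ∧ q ∈ pvKeys m ∧ (pvParent node).getD "" = q := by
  unfold pvNoParent at h
  cases hpar : pvParent node with
  | none => rw [hpar] at h; simp at h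
  | some q =>
    rw [hpar] at h
    simp only [Bool.or_eq_false_iff, Bool.not_eq_false'] at h
    refine ⟨q, rfl, by simpa using h.1, pvContains_iff.1 h.2, by simp⟩

theorem pvOrD_some_empty (s : String) : pvOrD (some s) "" = s := by
  by_cases h : s = "" <;> simp [pvOrD, h]

-- the parent of the entry at index i lies strictly earlier in the mapping
theorem pvParent_earlier {m : List (String × List (String × String))}
    (hpre : Pre_compute_relative_paths_py m) {i : Nat} (hi : i < m.length)
    {q : String} (hq : pvParent (m[i].2) = some q) (hne : q ≠ "")
    (hk : q ∈ pvKeys m) : (pvKeys m).idxOf q < i := by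
  have h3 := hpre.2.2 i hi q (by simp [hq])
  rcases h3 with h | h | h
  · exact absurd h hne
  · exact absurd hk h
  · exact h

-- facts about the entry sitting at the index of a key
theorem pvEntry_at_idx {m : List (String × List (String × String))}
    {q : String} (hk : q ∈ pvKeys m) :
    ∃ (hj : (pvKeys m).idxOf q < m.length), (m[(pvKeys m).idxOf q]'hj).1 = q := by
  have hlt : (pvKeys m).idxOf q < (pvKeys m).length := List.idxOf_lt_length_of_mem hk
  have hml : (pvKeys m).length = m.length := by simp [pvKeys]
  refine ⟨by omega, ?_⟩
  show Prod.fst (m[(pvKeys m).idxOf q]'(by omega)) = q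
  rw [← List.getElem_map (f := Prod.fst)]
  exact List.getElem_idxOf hlt

-- fuel irrelevance for the spec path (any fuel above the entry's index)
theorem pvP_fuel {m : List (String × List (String × String))} {key : String}
    (hnd : (pvKeys m).Nodup) (hpre : Pre_compute_relative_paths_py m) :
    ∀ i, ∀ (hi : i < m.length) (f g : Nat), i < f → i < g →
      pvP m key f ((m[i]'hi).1) = pvP m key g ((m[i]'hi).1) := by
  intro i
  induction i using Nat.strong_induction_on with
  | _ i ih =>
    intro hi f g hf hg
    obtain ⟨f', rfl⟩ : ∃ f', f = f' + 1 := ⟨f - 1, by omega⟩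
    obtain ⟨g', rfl⟩ : ∃ g', g = g' + 1 := ⟨g - 1, by omega⟩
    have hget : PySem.Dict.get? (PySem.Dict.mk m) ((m[i]'hi).1) = some ((m[i]'hi).2) :=
      pvGet?_of_mem hnd (by simp)
    rw [pvP, pvP, hget]
    cases hnp : pvNoParent m ((m[i]'hi).2) with
    | true => simp [hnp]
    | false =>
      obtain ⟨q, hq, hne, hk, hqd⟩ := pvNoParent_false hnp
      obtain ⟨hj, hjq⟩ := pvEntry_at_idx hk
      have hlt : (pvKeys m).idxOf q < i := pvParent_earlier hpre hi hq hne hk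
      have hrec := ih _ hlt hj f' g' (by omega) (by omega)
      rw [hjq] at hrec
      simp only [hnp, Bool.false_eq_true, if_false, hqd, hrec]

-- B's path function computes the spec path (the seen set never blocks a valid chain)
theorem pvPathB_eq {m : List (String × List (String × String))} {key : String}
    (hnd : (pvKeys m).Nodup) (hpre : Pre_compute_relative_paths_py m) :
    ∀ (f i : Nat) (hi : i < m.length) (seen : PySem.Set String), i < f →
      (∀ x ∈ (seen : List String), x ∈ pvKeys m → i ≤ (pvKeys m).idxOf x) →
      pvPathB m key f ((m[i]'hi).1) seen = some (pvP m key f ((m[i]'hi).1)) := by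
  intro f
  induction f with
  | zero => intro i hi seen hf; omega
  | succ f ihf =>
    intro i hi seen _ hseen
    have hget : PySem.Dict.get? (PySem.Dict.mk m) ((m[i]'hi).1) = some ((m[i]'hi).2) :=
      pvGet?_of_mem hnd (by simp)
    rw [pvPathB, pvP, hget]
    cases hnp : pvNoParent m ((m[i]'hi).2) with
    | true => simp [hnp]
    | false =>
      obtain ⟨q, hq, hne, hk, hqd⟩ := pvNoParent_false hnp
      obtain ⟨hj, hjq⟩ := pvEntry_at_idx hk
      have hlt : (pvKeys m).idxOf q < i := pvParent_earlier hpre hi hq hne hk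
      have hqnotseen : q ∉ (seen : List String) := by
        intro hmem
        have := hseen q hmem hk
        omega
      have hcont : PySem.Set.contains seen q = false := by
        rw [← Bool.not_eq_true, PySem.Set.contains_iff]; exact hqnotseen
      have hseen' : ∀ x ∈ (PySem.Set.union seen (PySem.Set.add PySem.Set.empty q) : List String),
          x ∈ pvKeys m → (pvKeys m).idxOf q ≤ (pvKeys m).idxOf x := by
        intro x hx hxk
        rcases (PySem.Set.mem_union _ _ _).1 hx with hx' | hx'
        · have := hseen x hx' hxk; omega
        · have : x = q := by
            have := (PySem.Set.mem_add _ _ _).1 hx'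
            simpa [PySem.Set.empty] using this
          subst this; omega
      have hrec := ihf ((pvKeys m).idxOf q) hj
        (PySem.Set.union seen (PySem.Set.add PySem.Set.empty q)) (by omega) hseen'
      rw [hjq] at hrec
      simp only [hnp, Bool.false_eq_true, if_false, hqd, hcont, hrec]

-- one pass of A's while loop over a mapping with parents strictly earlier: everything
-- still missing is appended, in mapping order
theorem pvPass_fold {m : List (String × List (String × String))}
    (hnd : (pvKeys m).Nodup) (hpre : Pre_compute_relative_paths_py m) :
    ∀ (suf pre : List (String × List (String × String))) (b : Bool), m = pre ++ suf →
      suf.foldl (pvPassStep m) (pvKeys pre, (pvKeys pre : PySem.Set String), b) =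
        (pvKeys m, (pvKeys m : PySem.Set String), b || !suf.isEmpty) := by
  intro suf
  induction suf with
  | nil =>
    intro pre b hsplit
    rw [List.append_nil] at hsplit
    subst hsplit
    simp
  | cons pr suf ihs =>
    intro pre b hsplit
    obtain ⟨d, node⟩ := pr
    have hkeys : pvKeys m = pvKeys pre ++ d :: pvKeys suf := by
      rw [hsplit]; simp [pvKeys]
    have hd_notpre : d ∉ pvKeys pre := by
      have h2 := hnd
      rw [hkeys] at h2
      rcases List.nodup_append.1 h2 with ⟨_, _, h3⟩
      intro hm
      exact h3 d hm d List.mem_cons_self rfl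
    have hdc : PySem.Set.contains (pvKeys pre : PySem.Set String) d = false := by
      rw [← Bool.not_eq_true, PySem.Set.contains_iff]; exact hd_notpre
    have hi : pre.length < m.length := by rw [hsplit]; simp
    have hmi : m[pre.length]'hi = (d, node) := by
      subst hsplit
      simp [List.getElem_append_right (le_refl pre.length)]
    have helig :
        (match pvParent node with
          | none => true
          | some p => p == "" || !(PySem.Dict.contains (PySem.Dict.mk m) p) ||
              PySem.Set.contains (pvKeys pre : PySem.Set String) p) = true := by
      cases hpar : pvParent node with
      | none => rfl
      | some p =>
        by_cases hpe : p = ""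
        · simp [hpe]
        · by_cases hpk : p ∈ pvKeys m
          · have hlt : (pvKeys m).idxOf p < pre.length := by
              apply pvParent_earlier hpre hi _ hpe hpk
              rw [hmi]; exact hpar
            have hppre : p ∈ pvKeys pre := by
              by_contra hnp
              rw [hkeys, List.idxOf_append_of_notMem hnp] at hlt
              simp [pvKeys] at hlt
            have : PySem.Set.contains (pvKeys pre : PySem.Set String) p = true :=
              (PySem.Set.contains_iff _ _).2 hppre
            simp only [this, Bool.or_true]
          · have : PySem.Dict.contains (PySem.Dict.mk m) p = false := by
              rw [← Bool.not_eq_true, pvContains_iff]; exact hpk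
            simp [this]
    have hstep : pvPassStep m (pvKeys pre, (pvKeys pre : PySem.Set String), b) (d, node) =
        (pvKeys (pre ++ [(d, node)]), (pvKeys (pre ++ [(d, node)]) : PySem.Set String), true) := by
      simp only [pvPassStep, hdc, Bool.false_eq_true, if_false, helig, if_true]
      rw [PySem.Set.add_of_not_mem hd_notpre]
      simp [pvKeys]
    rw [List.foldl_cons, hstep, ihs (pre ++ [(d, node)]) true (by rw [hsplit]; simp)]
    simp

-- A's while loop produces the keys in mapping order
theorem pvLoopA_eq {m : List (String × List (String × String))}
    (hnd : (pvKeys m).Nodup) (hpre : Pre_compute_relative_paths_py m) :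
    pvLoopA m (m.length + 1) [] PySem.Set.empty = pvKeys m := by
  cases hm : m with
  | nil => simp [pvLoopA, pvKeys]
  | cons h t =>
    rw [← hm]
    have hlen : 0 < m.length := by rw [hm]; simp
    rw [pvLoopA, if_pos (by simpa using hlen)]
    have hfold := pvPass_fold hnd hpre m [] false rfl
    have hempty : (PySem.Set.empty : PySem.Set String) = ((pvKeys ([] : List (String × List (String × String)))) : PySem.Set String) := rfl
    simp only [pvKeys, List.map_nil] at hfold
    have hne : m.isEmpty = false := by rw [hm]; rfl
    rw [hne] at hfold
    simp only [Bool.false_or, Bool.not_false] at hfold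
    rw [show (PySem.Set.empty : PySem.Set String) = ([] : List String) from rfl]
    rw [hfold]
    show pvLoopA m m.length (List.map Prod.fst m) (List.map Prod.fst m) = pvKeys m
    obtain ⟨k, hk⟩ : ∃ k, m.length = k + 1 := ⟨m.length - 1, by omega⟩
    have hstop : pvLoopA m (k + 1) (List.map Prod.fst m) (List.map Prod.fst m) =
        List.map Prod.fst m := by
      rw [pvLoopA, if_neg (by simp)]
    rw [hk, hstop]
    rfl

-- folding A's path-building loop over the keys yields the spec paths, in mapping order
theorem pvRel_fold {m : List (String × List (String × String))} {key : String}
    (hnd : (pvKeys m).Nodup) (hpre : Pre_compute_relative_paths_py m) :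
    ∀ (suf pre : List (String × List (String × String))), m = pre ++ suf →
      (pvKeys suf).foldl (pvRelStep m key)
        (PySem.Dict.mk (pre.map (fun pr => (pr.1, pvP m key (m.length + 1) pr.1)))) =
      PySem.Dict.mk (m.map (fun pr => (pr.1, pvP m key (m.length + 1) pr.1))) := by
  intro suf
  induction suf with
  | nil =>
    intro pre hsplit
    rw [List.append_nil] at hsplit
    subst hsplit
    rfl
  | cons pr suf ihs =>
    intro pre hsplit
    obtain ⟨d, node⟩ := pr
    have hkeys : pvKeys m = pvKeys pre ++ d :: pvKeys suf := by
      rw [hsplit]; simp [pvKeys]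
    have hd_notpre : d ∉ pvKeys pre := by
      have h2 := hnd
      rw [hkeys] at h2
      rcases List.nodup_append.1 h2 with ⟨_, _, h3⟩
      intro hm
      exact h3 d hm d List.mem_cons_self rfl
    have hi : pre.length < m.length := by rw [hsplit]; simp
    have hmi : m[pre.length]'hi = (d, node) := by
      subst hsplit
      simp [List.getElem_append_right (le_refl pre.length)]
    have hget : PySem.Dict.get? (PySem.Dict.mk m) d = some node :=
      pvGet?_of_mem hnd (by rw [hsplit]; simp)
    have hDnodup : (PySem.Dict.mk (pre.map (fun pr => (pr.1, pvP m key (m.length + 1) pr.1)))).keys.Nodup := by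
      show ((pre.map (fun pr => (pr.1, pvP m key (m.length + 1) pr.1))).map Prod.fst).Nodup
      rw [List.map_map]
      have : ((fun (p : String × String) => p.1) ∘
          (fun pr : String × List (String × String) => (pr.1, pvP m key (m.length + 1) pr.1))) =
          Prod.fst := rfl
      rw [this]
      rw [hkeys] at hnd
      exact (List.nodup_append.1 hnd).1
    have hDcont : (PySem.Dict.mk (pre.map (fun pr => (pr.1, pvP m key (m.length + 1) pr.1)))).contains d = false := by
      rw [← Bool.not_eq_true, PySem.Dict.contains_iff_mem_keys]
      show ¬ d ∈ (pre.map (fun pr => (pr.1, pvP m key (m.length + 1) pr.1))).map Prod.fst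
      intro hmem
      apply hd_notpre
      rw [List.map_map] at hmem
      simpa [pvKeys] using hmem
    -- the value A inserts at d is the spec path of d
    have hPd : pvP m key (m.length + 1) d =
        (if pvNoParent m node then pvFolder key d node
         else
           let pp := pvP m key m.length ((pvParent node).getD "")
           if pp = "" then pvFolder key d node else pp ++ "/" ++ pvFolder key d node) := by
      rw [pvP, hget]
    have hstep : pvRelStep m key
        (PySem.Dict.mk (pre.map (fun pr => (pr.1, pvP m key (m.length + 1) pr.1)))) d =
        PySem.Dict.mk ((pre ++ [(d, node)]).map (fun pr => (pr.1, pvP m key (m.length + 1) pr.1))) := by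
      have hinsert : ∀ v,
          ((PySem.Dict.mk (pre.map (fun pr => (pr.1, pvP m key (m.length + 1) pr.1)))).insert d v).items =
            (pre.map (fun pr => (pr.1, pvP m key (m.length + 1) pr.1))) ++ [(d, v)] := by
        intro v
        exact PySem.Dict.items_insert_of_not_contains _ _ hDcont
      rw [pvRelStep, hget]
      simp only
      cases hnp : pvNoParent m node with
      | true =>
        simp only [if_true]
        apply PySem.Dict.ext
        rw [hinsert]
        show _ = List.map _ (pre ++ [(d, node)])
        rw [List.map_append]
        simp only [List.map_cons, List.map_nil]
        rw [hPd]
        simp only [hnp, if_true]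
      | false =>
        obtain ⟨q, hq, hne, hk, hqd⟩ := pvNoParent_false hnp
        obtain ⟨hj, hjq⟩ := pvEntry_at_idx hk
        have hlt : (pvKeys m).idxOf q < pre.length := by
          apply pvParent_earlier hpre hi _ hne hk
          rw [hmi]; exact hq
        have hqpre : (q, pvP m key (m.length + 1) q) ∈
            pre.map (fun pr => (pr.1, pvP m key (m.length + 1) pr.1)) := by
          have hqm : m[(pvKeys m).idxOf q]'hj = pre[(pvKeys m).idxOf q]'hlt := by
            have h0 := List.getElem_of_eq hsplit hj
            rw [h0]
            exact List.getElem_append_left hlt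
          have hqmem : m[(pvKeys m).idxOf q]'hj ∈ pre := by
            rw [hqm]; exact List.getElem_mem hlt
          have h2 := List.mem_map_of_mem
            (f := fun pr : String × List (String × String) => (pr.1, pvP m key (m.length + 1) pr.1)) hqmem
          simpa only [hjq] using h2
        have hgetq : (PySem.Dict.mk (pre.map (fun pr => (pr.1, pvP m key (m.length + 1) pr.1)))).get? q =
            some (pvP m key (m.length + 1) q) :=
          (PySem.Dict.get?_eq_some_iff_mem_items _ _ _ hDnodup).2 hqpre
        have hPfuel : pvP m key m.length q = pvP m key (m.length + 1) q := by
          have := pvP_fuel (key := key) hnd hpre ((pvKeys m).idxOf q) hj m.length (m.length + 1)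
            (by omega) (by omega)
          rw [hjq] at this
          exact this
        simp only [Bool.false_eq_true, if_false]
        rw [hqd, hgetq, pvOrD_some_empty]
        apply PySem.Dict.ext
        rw [hinsert]
        show _ = List.map _ (pre ++ [(d, node)])
        rw [List.map_append]
        simp only [List.map_cons, List.map_nil]
        rw [hPd]
        simp only [hnp, Bool.false_eq_true, if_false, hqd, hPfuel]
    have hkc : pvKeys ((d, node) :: suf) = d :: pvKeys suf := by simp [pvKeys]
    rw [hkc, List.foldl_cons, hstep]
    exact ihs (pre ++ [(d, node)]) (by rw [hsplit]; simp)

-- both builds compute the same association list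
theorem pvBuild_eq {m : List (String × List (String × String))} {key : String}
    (hnd : (pvKeys m).Nodup) (hpre : Pre_compute_relative_paths_py m) :
    pvBuildA m key = pvBuildB m key := by
  -- A's side
  have hA : pvBuildA m key = m.map (fun pr => (pr.1, pvP m key (m.length + 1) pr.1)) := by
    unfold pvBuildA
    rw [pvLoopA_eq hnd hpre]
    have := pvRel_fold (key := key) hnd hpre m [] rfl
    simp only [List.map_nil] at this
    show (List.foldl (pvRelStep m key) PySem.Dict.empty (pvKeys m)).items =
      m.map (fun pr => (pr.1, pvP m key (m.length + 1) pr.1))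
    rw [show (PySem.Dict.empty : PySem.Dict String String) = PySem.Dict.mk [] from rfl, this]
  -- B's side
  have hB : pvBuildB m key = m.map (fun pr => (pr.1, pvP m key (m.length + 1) pr.1)) := by
    unfold pvBuildB
    have hcongr : m.foldl (fun rel pr =>
        match pvPathB m key (m.length + 1) pr.1 (PySem.Set.add PySem.Set.empty pr.1) with
        | none => rel
        | some p => rel.insert pr.1 p) PySem.Dict.empty =
      m.foldl (fun rel pr => rel.insert pr.1 (pvP m key (m.length + 1) pr.1)) PySem.Dict.empty := by
      apply PySem.List.foldl_congr_mem
      intro acc pr hpr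
      obtain ⟨i, hi, hig⟩ := List.mem_iff_getElem.1 hpr
      have hseen : ∀ x ∈ ((PySem.Set.add PySem.Set.empty pr.1) : List String),
          x ∈ pvKeys m → i ≤ (pvKeys m).idxOf x := by
        intro x hx hxk
        have hx1 : x = pr.1 := by
          have := (PySem.Set.mem_add _ _ _).1 hx
          simpa [PySem.Set.empty] using this
        subst hx1
        have hkeyi : (pvKeys m)[i]'(by simp [pvKeys]; omega) = pr.1 := by
          simp [pvKeys, hig]
        have : (pvKeys m).idxOf pr.1 = i := by
          rw [← hkeyi]
          exact hnd.idxOf_getElem i _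
        omega
      have := pvPathB_eq (key := key) hnd hpre (m.length + 1) i hi
        (PySem.Set.add PySem.Set.empty pr.1) (by omega) hseen
      rw [hig] at this
      rw [this]
    rw [hcongr]
    have hfresh : ∀ pr ∈ m, (PySem.Dict.empty : PySem.Dict String String).contains pr.1 = false := by
      intro pr _
      rfl
    have := PySem.Dict.items_foldl_insert_fresh m
      (fun pr => pr.1) (fun pr => pvP m key (m.length + 1) pr.1)
      (PySem.Dict.empty : PySem.Dict String String) hfresh (by simpa [pvKeys] using hnd)
    simpa using this
  rw [hA, hB]

-- ===== VERDICT (by name: the statement is the Claim_ definition above) =====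
theorem compute_relative_paths_py_spec : Claim_equal_compute_relative_paths_py := by
  intro mapping _ hpre
  unfold Spec_compute_relative_paths_py
  unfold compute_relative_paths_py compute_relative_paths_py_alt
  have hnd : (pvKeys mapping).Nodup := hpre.1
  rw [pvBuild_eq hnd hpre, pvBuild_eq hnd hpre]
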